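-- pv_equiv track=rewrite | github.com/yellephen/observegpo | observegpo.py | is_user_in_ou
-- ===== SOURCE A (Python) =====
-- def is_user_in_ou(user_dn, ou_dn):
--     user_dn_parts = user_dn.split(',')
--     ou_dn_parts = ou_dn.split(',')
--
--     if len(user_dn_parts) < len(ou_dn_parts):
--         return False
--
--     for i in range(len(ou_dn_parts)):
--         if user_dn_parts[-i-1].lower() != ou_dn_parts[-i-1].lower():
--             return False
--
--     return True
-- ===== SOURCE B (Python) =====
-- def is_user_in_ou(user_dn, ou_dn):
--     lu = user_dn.lower()
--     lo = ou_dn.lower()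
--     return lu == lo or lu.endswith("," + lo)
-- ===== Notes on version B (the rewrite author's own statement) =====
-- stated objective: simpler
-- what changed: Replaces the split-into-components-and-reverse-index loop with a single case-insensitive string suffix test: equal, or ends with ',' + ou_dn; no lists are built or iterated.
import Mathlib
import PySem

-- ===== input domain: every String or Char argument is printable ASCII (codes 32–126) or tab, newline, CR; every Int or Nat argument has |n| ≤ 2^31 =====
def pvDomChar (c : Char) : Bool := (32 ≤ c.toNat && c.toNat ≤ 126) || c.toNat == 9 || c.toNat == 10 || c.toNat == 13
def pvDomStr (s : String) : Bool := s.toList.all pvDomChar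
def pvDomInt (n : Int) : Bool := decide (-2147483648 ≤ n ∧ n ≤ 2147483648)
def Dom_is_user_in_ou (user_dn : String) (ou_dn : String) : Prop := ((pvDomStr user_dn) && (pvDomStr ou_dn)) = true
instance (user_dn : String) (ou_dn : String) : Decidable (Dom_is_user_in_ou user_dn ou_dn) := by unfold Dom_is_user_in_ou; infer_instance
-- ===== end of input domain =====

-- B replaces A's split-into-components-and-reverse-index loop by one case-insensitive
-- string suffix test (equal, or ends with ',' + ou_dn); same return value everywhere.

-- ===== PORT A =====
-- A-side helper: the for-loop over range(len(ou_dn_parts)) with its early return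
def isUserLoop (up op : List (List Char)) : List Int → Bool
  | [] => true
  | i :: rest =>
      match PySem.List.pyGet? up (-i - 1), PySem.List.pyGet? op (-i - 1) with
      | some a, some b =>
          if PySem.Chars.lower a ≠ PySem.Chars.lower b then false
          else isUserLoop up op rest
      | _, _ => false   -- IndexError branch; unreachable: every loop index is in range

def is_user_in_ou (user_dn : String) (ou_dn : String) : Bool :=
  let user_dn_parts := PySem.Chars.splitOn user_dn.toList ",".toList
  let ou_dn_parts := PySem.Chars.splitOn ou_dn.toList ",".toList
  if user_dn_parts.length < ou_dn_parts.length then false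
  else isUserLoop user_dn_parts ou_dn_parts (PySem.List.pyRange 0 (ou_dn_parts.length : Int) 1)

-- ===== PORT B =====
def is_user_in_ou_alt (user_dn : String) (ou_dn : String) : Bool :=
  let lu := PySem.Chars.lower user_dn.toList
  let lo := PySem.Chars.lower ou_dn.toList
  lu == lo || PySem.Chars.endswith lu (',' :: lo)

-- ===== PRECONDITION & SPEC =====
def Spec_is_user_in_ou (user_dn : String) (ou_dn : String) (out : Bool) : Prop := out = is_user_in_ou_alt user_dn ou_dn
instance (user_dn : String) (ou_dn : String) (out : Bool) : Decidable (Spec_is_user_in_ou user_dn ou_dn out) := by unfold Spec_is_user_in_ou; infer_instance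

-- ===== CLAIM (what is proved, stated in full; the proofs are below) =====
def Claim_equal_is_user_in_ou : Prop := ∀ (user_dn : String) (ou_dn : String), Dom_is_user_in_ou user_dn ou_dn → Spec_is_user_in_ou user_dn ou_dn (is_user_in_ou user_dn ou_dn)

-- ===== LEMMAS AND PROOFS =====

-- splitting on ',' written as plain structural recursion
def splitAux (pre : List Char) : List Char → List (List Char)
  | [] => [pre]
  | c :: r => if c = ',' then pre :: splitAux [] r else splitAux (pre ++ [c]) r

theorem go_spec (fuel : Nat) (l cur : List Char) (accs : List (List Char))
    (h : l.length ≤ fuel) :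
    PySem.Chars.splitOn.go [','] fuel l cur accs = accs.reverse ++ splitAux cur.reverse l := by
  induction fuel generalizing l cur accs with
  | zero =>
    have hl : l = [] := List.length_eq_zero_iff.mp (Nat.le_zero.mp h)
    subst hl
    rw [PySem.Chars.splitOn.go]
    simp [splitAux]
  | succ n ih =>
    cases l with
    | nil => rw [PySem.Chars.splitOn.go]; simp [splitAux]; omega
    | cons c r =>
      rw [PySem.Chars.splitOn.go]
      by_cases hc : c = ','
      · subst hc
        simp [List.isPrefixOf, splitAux, ih r _ _ (by simpa using h)]
      · have hp : [','].isPrefixOf (c :: r) = false := by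
          simp [List.isPrefixOf]; exact fun e => (hc e.symm).elim
        simp only [hp, Bool.false_eq_true, if_false]
        rw [ih r (c :: cur) accs (by simpa using h)]
        simp [splitAux, hc]

theorem splitOn_eq (s : List Char) :
    PySem.Chars.splitOn s [','] = splitAux [] s := by
  rw [PySem.Chars.splitOn, go_spec _ _ _ _ (by omega)]; simp

theorem lowerChar_eq_comma (c : Char) : PySem.Chars.lowerChar c = ',' ↔ c = ',' := by
  unfold PySem.Chars.lowerChar PySem.Chars.isupper
  split_ifs with h
  · simp only [Bool.and_eq_true, decide_eq_true_eq] at h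
    have hb : 65 ≤ c.toNat ∧ c.toNat ≤ 90 := by
      obtain ⟨h1, h2⟩ := h
      rw [Char.le_def] at h1 h2
      exact ⟨h1, h2⟩
    constructor
    · intro he
      have h2 := congrArg Char.toNat he
      rw [Char.toNat_ofNat] at h2
      rw [if_pos (Or.inl (by omega))] at h2
      have : (','.toNat) = 44 := by decide
      omega
    · intro he; subst he; simp at h
  · simp

theorem lower_as_map (s : List Char) :
    PySem.Chars.lower s = s.map PySem.Chars.lowerChar := rfl

-- lowering commutes with splitting (',' is fixed by lowerChar, and nothing lowers to ',')
theorem lower_splitAux (l pre : List Char) :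
    (splitAux pre l).map (List.map PySem.Chars.lowerChar)
      = splitAux (pre.map PySem.Chars.lowerChar) (l.map PySem.Chars.lowerChar) := by
  induction l generalizing pre with
  | nil => simp [splitAux]
  | cons c r ih =>
    by_cases hc : c = ','
    · subst hc
      simp [splitAux, show PySem.Chars.lowerChar ',' = ',' from by decide, ih]
    · have hlc : ¬ PySem.Chars.lowerChar c = ',' := fun h => hc ((lowerChar_eq_comma c).mp h)
      simp only [List.map_cons, splitAux, if_neg hc, if_neg hlc]
      rw [ih (pre ++ [c])]
      simp

theorem splitAux_ne_nil (pre l : List Char) : splitAux pre l ≠ [] := by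
  induction l generalizing pre with
  | nil => simp [splitAux]
  | cons c r ih =>
    by_cases hc : c = ','
    · simp [splitAux, hc]
    · simp only [splitAux, if_neg hc]
      exact ih _

def joinC : List (List Char) → List Char
  | [] => []
  | [x] => x
  | x :: xs => x ++ ',' :: joinC xs

theorem joinC_cons (x : List Char) (xs : List (List Char)) (h : xs ≠ []) :
    joinC (x :: xs) = x ++ ',' :: joinC xs := by
  cases xs with
  | nil => exact absurd rfl h
  | cons y ys => rfl

theorem joinC_splitAux (pre l : List Char) : joinC (splitAux pre l) = pre ++ l := by
  induction l generalizing pre with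
  | nil => simp [splitAux, joinC]
  | cons c r ih =>
    by_cases hc : c = ','
    · subst hc
      show joinC (splitAux pre (',' :: r)) = _
      rw [show splitAux pre (',' :: r) = pre :: splitAux [] r from by simp [splitAux]]
      rw [joinC_cons _ _ (splitAux_ne_nil [] r), ih []]
      simp
    · show joinC (splitAux pre (c :: r)) = _
      rw [show splitAux pre (c :: r) = splitAux (pre ++ [c]) r from by simp [splitAux, hc]]
      rw [ih (pre ++ [c])]
      simp

theorem joinC_append (P Q : List (List Char)) (hP : P ≠ []) (hQ : Q ≠ []) :
    joinC (P ++ Q) = joinC P ++ ',' :: joinC Q := by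
  induction P with
  | nil => exact absurd rfl hP
  | cons p ps ih =>
    cases ps with
    | nil => simpa using joinC_cons p Q hQ
    | cons q qs =>
      rw [List.cons_append, joinC_cons p ((q :: qs) ++ Q) (by simp),
          ih (by simp), joinC_cons p (q :: qs) (by simp)]
      simp

theorem splitAux_append (pre xs ys : List Char) :
    splitAux pre (xs ++ ',' :: ys) = splitAux pre xs ++ splitAux [] ys := by
  induction xs generalizing pre with
  | nil => simp [splitAux]
  | cons c r ih => by_cases hc : c = ',' <;> simp [splitAux, hc, ih]

theorem main_iff (u o : List Char) :
    (splitAux [] o <:+ splitAux [] u) ↔ (u = o ∨ (',' :: o) <:+ u) := by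
  constructor
  · rintro ⟨P, hP⟩
    cases P with
    | nil =>
      left
      have := congrArg joinC hP
      simpa [joinC_splitAux] using this.symm
    | cons p ps =>
      right
      refine ⟨joinC (p :: ps), ?_⟩
      have h2 := congrArg joinC hP
      rw [joinC_append (p :: ps) _ (by simp) (splitAux_ne_nil _ _)] at h2
      simpa [joinC_splitAux] using h2
  · rintro (rfl | ⟨p, hp⟩)
    · exact List.suffix_refl _
    · refine ⟨splitAux [] p, ?_⟩
      rw [← splitAux_append, hp]

-- the reverse-index comparison, as a pairwise walk over the reversed part lists
def cmpParts : List (List Char) → List (List Char) → Bool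
  | [], _ => true
  | _ :: _, [] => false
  | o :: os, u :: us =>
      if PySem.Chars.lower u ≠ PySem.Chars.lower o then false else cmpParts os us

theorem cmpParts_iff (os us : List (List Char)) :
    cmpParts os us = true ↔ os.map PySem.Chars.lower <+: us.map PySem.Chars.lower := by
  induction os generalizing us with
  | nil => simp [cmpParts]
  | cons o os ih =>
    cases us with
    | nil => simp [cmpParts]
    | cons u us =>
      rw [List.map_cons, List.map_cons, List.cons_prefix_cons]
      show (if PySem.Chars.lower u ≠ PySem.Chars.lower o then false
            else cmpParts os us) = true ↔ _
      by_cases h : PySem.Chars.lower u = PySem.Chars.lower o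
      · rw [if_neg (by simp [h]), ih]
        exact ⟨fun hp => ⟨h.symm, hp⟩, fun hp => hp.2⟩
      · rw [if_pos (by simpa using h)]
        simp only [Bool.false_eq_true, false_iff]
        rintro ⟨he, -⟩
        exact h he.symm

theorem pyGet?_negIdx {α : Type} (xs : List α) (k : Nat) (hk : k < xs.length) :
    PySem.List.pyGet? xs (-(k : Int) - 1) = xs.reverse[k]? := by
  unfold PySem.List.pyGet? PySem.List.pyIdx?
  rw [if_neg (by omega), if_pos (by omega)]
  rw [Option.bind_some]
  rw [List.getElem?_reverse hk]
  congr 1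
  omega

theorem pyRange_empty (a b : Int) (h : b ≤ a) : PySem.List.pyRange a b 1 = [] := by
  simp [PySem.List.pyRange]
  intro h'
  omega

theorem loop_spec (up op : List (List Char)) (hlen : op.length ≤ up.length) :
    ∀ (n k : Nat), k ≤ op.length → n = op.length - k →
      isUserLoop up op (PySem.List.pyRange (k : Int) (op.length : Int) 1)
        = cmpParts (op.reverse.drop k) (up.reverse.drop k) := by
  intro n
  induction n with
  | zero =>
    intro k hk hn
    have hke : k = op.length := by omega
    subst hke
    rw [pyRange_empty _ _ (by omega)]
    rw [List.drop_eq_nil_of_le (by simp)]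
    simp [isUserLoop, cmpParts]
  | succ n ih =>
    intro k hk hn
    have hklt : k < op.length := by omega
    rw [PySem.List.pyRange_one_cons (by exact_mod_cast hklt)]
    have hcast : ((k : Int) + 1) = ((k + 1 : Nat) : Int) := by push_cast; ring
    have hko : k < op.reverse.length := by simpa using hklt
    have hku : k < up.reverse.length := by simp; omega
    have ho := pyGet?_negIdx op k hklt
    have hu := pyGet?_negIdx up k (by omega)
    rw [List.getElem?_eq_getElem hko] at ho
    rw [List.getElem?_eq_getElem hku] at hu
    rw [List.drop_eq_getElem_cons hko, List.drop_eq_getElem_cons hku]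
    show (match PySem.List.pyGet? up (-(k:Int) - 1), PySem.List.pyGet? op (-(k:Int) - 1) with
      | some a, some b =>
          if PySem.Chars.lower a ≠ PySem.Chars.lower b then false
          else isUserLoop up op (PySem.List.pyRange ((k:Int) + 1) (op.length : Int) 1)
      | _, _ => false) = _
    rw [ho, hu]
    show (if PySem.Chars.lower up.reverse[k] ≠ PySem.Chars.lower op.reverse[k] then false
          else isUserLoop up op (PySem.List.pyRange ((k:Int) + 1) (op.length : Int) 1))
        = cmpParts (op.reverse[k] :: op.reverse.drop (k + 1))
            (up.reverse[k] :: up.reverse.drop (k + 1))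
    by_cases h : PySem.Chars.lower up.reverse[k] = PySem.Chars.lower op.reverse[k]
    · rw [if_neg (not_not_intro h)]
      rw [hcast, ih (k + 1) (by omega) (by omega)]
      show _ = (if PySem.Chars.lower up.reverse[k] ≠ PySem.Chars.lower op.reverse[k] then false
          else cmpParts (op.reverse.drop (k + 1)) (up.reverse.drop (k + 1)))
      rw [if_neg (not_not_intro h)]
    · rw [if_pos h]
      show false = (if PySem.Chars.lower up.reverse[k] ≠ PySem.Chars.lower op.reverse[k] then false
          else cmpParts (op.reverse.drop (k + 1)) (up.reverse.drop (k + 1)))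
      rw [if_pos h]

theorem is_user_in_ou_eq (u o : String) :
    is_user_in_ou u o
      = decide (splitAux [] (PySem.Chars.lower o.toList)
                  <:+ splitAux [] (PySem.Chars.lower u.toList)) := by
  have hcomma : (",".toList) = [','] := rfl
  unfold is_user_in_ou
  simp only [hcomma, splitOn_eq]
  have hLu : splitAux [] (PySem.Chars.lower u.toList)
      = (splitAux [] u.toList).map PySem.Chars.lower := by
    rw [lower_as_map]
    rw [show ((splitAux [] u.toList).map PySem.Chars.lower)
        = (splitAux [] u.toList).map (List.map PySem.Chars.lowerChar) from rfl]
    rw [lower_splitAux u.toList []]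
    rfl
  have hLo : splitAux [] (PySem.Chars.lower o.toList)
      = (splitAux [] o.toList).map PySem.Chars.lower := by
    rw [lower_as_map]
    rw [show ((splitAux [] o.toList).map PySem.Chars.lower)
        = (splitAux [] o.toList).map (List.map PySem.Chars.lowerChar) from rfl]
    rw [lower_splitAux o.toList []]
    rfl
  by_cases hlt : (splitAux [] u.toList).length < (splitAux [] o.toList).length
  · rw [if_pos hlt]
    have hns : ¬ (splitAux [] (PySem.Chars.lower o.toList)
                <:+ splitAux [] (PySem.Chars.lower u.toList)) := by
      intro hs
      have := hs.length_le
      rw [hLu, hLo] at this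
      simp at this
      omega
    simp [hns]
  · rw [if_neg hlt]
    have hlen : (splitAux [] o.toList).length ≤ (splitAux [] u.toList).length := by omega
    have hl0 := loop_spec (splitAux [] u.toList) (splitAux [] o.toList) hlen
      ((splitAux [] o.toList).length) 0 (by omega) (by omega)
    rw [show ((0 : Nat) : Int) = 0 from rfl] at hl0
    rw [hl0]
    simp only [List.drop_zero]
    rw [Bool.eq_iff_iff, cmpParts_iff]
    simp only [decide_eq_true_eq]
    rw [List.map_reverse, List.map_reverse, List.reverse_prefix, hLu, hLo]

-- ===== VERDICT (by name: the statement is the Claim_ definition above) =====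
theorem is_user_in_ou_spec : Claim_equal_is_user_in_ou := by
  intro u o _
  unfold Spec_is_user_in_ou
  rw [is_user_in_ou_eq]
  unfold is_user_in_ou_alt
  rw [Bool.eq_iff_iff]
  simp only [decide_eq_true_eq, Bool.or_eq_true, beq_iff_eq,
    PySem.Chars.endswith_iff]
  rw [main_iff]
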